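-- pv_equiv track=rewrite | github.com/cirosantilli/project-euler-solvers | solvers/494.py | patterns_differ
-- ===== SOURCE A (Python) =====
-- from typing import List, Tuple
--
-- def patterns_differ(o: int, A: int, B: int, C: int, d_rev: List[int]) -> bool:
--     # Build the full prefix values for the concrete q (encoded in o),
--     # and the coefficient ordering for q -> infinity.
--     d_list = d_rev[::-1]
--     terms: List[Tuple[int, int, int, int]] = []
--     v = o
--     a = A
--     b = B
--     c = C
--     for d in d_list:
--         terms.append((v, a, b, c))
--         v = 3 * v + 1
--         a, b = 3 * a, 3 * b - c
--         for _ in range(d):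
--             terms.append((v, a, b, c))
--             v //= 2
--             c *= 2
--     terms.append((v, a, b, c))
--
--     idxs = list(range(len(terms)))
--     idxs.sort(key=lambda i: terms[i][0])
--     rank1 = [0] * len(terms)
--     for r, idx in enumerate(idxs, 1):
--         rank1[idx] = r
--
--     ordered: List[int] = []
--     for idx in range(len(terms)):
--         a1, b1, c1 = terms[idx][1], terms[idx][2], terms[idx][3]
--         lo, hi = 0, len(ordered)
--         while lo < hi:
--             mid = (lo + hi) // 2
--             j = ordered[mid]
--             a2, b2, c2 = terms[j][1], terms[j][2], terms[j][3]
--             left = a1 * c2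
--             right = a2 * c1
--             if left < right or (left == right and b1 * c2 < b2 * c1):
--                 hi = mid
--             else:
--                 lo = mid + 1
--         ordered.insert(lo, idx)
--
--     rank2 = [0] * len(terms)
--     for r, idx in enumerate(ordered, 1):
--         rank2[idx] = r
--     return rank1 != rank2
-- ===== SOURCE B (Python) =====
-- from typing import List, Tuple
--
-- def patterns_differ(o: int, A: int, B: int, C: int, d_rev: List[int]) -> bool:
--     # Build the same terms list as the original.
--     d_list = d_rev[::-1]
--     terms: List[Tuple[int, int, int, int]] = []
--     v = o
--     a = A
--     b = B
--     c = C
--     for d in d_list: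
--         terms.append((v, a, b, c))
--         v = 3 * v + 1
--         a, b = 3 * a, 3 * b - c
--         for _ in range(d):
--             terms.append((v, a, b, c))
--             v //= 2
--             c *= 2
--     terms.append((v, a, b, c))
--
--     # Ranking 1: stable sort of the indices by the prefix value.
--     order1 = sorted(range(len(terms)), key=lambda i: terms[i][0])
--
--     # The two rankings coincide iff order1 is already sorted under the
--     # coefficient ordering (with stability: equal keys keep index order).
--     for i, j in zip(order1, order1[1:]):
--         a1, b1, c1 = terms[i][1], terms[i][2], terms[i][3]
--         a2, b2, c2 = terms[j][1], terms[j][2], terms[j][3]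
--         lt_ij = a1 * c2 < a2 * c1 or (a1 * c2 == a2 * c1 and b1 * c2 < b2 * c1)
--         lt_ji = a2 * c1 < a1 * c2 or (a2 * c1 == a1 * c2 and b2 * c1 < b1 * c2)
--         ok = lt_ij or (not lt_ji and i < j)
--         if not ok:
--             return True
--     return False
-- ===== Notes on version B (the rewrite author's own statement) =====
-- stated objective: faster
-- what changed: B keeps the terms-build and the first stable sort, but drops A's O(n^2) binary-insertion second sort and both rank arrays entirely: the two rankings coincide iff the value-sorted index list is already (stably) sorted under the coefficient comparator, so B just scans its adjacent pairs with the same cross-multiplication test.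
import Mathlib
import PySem

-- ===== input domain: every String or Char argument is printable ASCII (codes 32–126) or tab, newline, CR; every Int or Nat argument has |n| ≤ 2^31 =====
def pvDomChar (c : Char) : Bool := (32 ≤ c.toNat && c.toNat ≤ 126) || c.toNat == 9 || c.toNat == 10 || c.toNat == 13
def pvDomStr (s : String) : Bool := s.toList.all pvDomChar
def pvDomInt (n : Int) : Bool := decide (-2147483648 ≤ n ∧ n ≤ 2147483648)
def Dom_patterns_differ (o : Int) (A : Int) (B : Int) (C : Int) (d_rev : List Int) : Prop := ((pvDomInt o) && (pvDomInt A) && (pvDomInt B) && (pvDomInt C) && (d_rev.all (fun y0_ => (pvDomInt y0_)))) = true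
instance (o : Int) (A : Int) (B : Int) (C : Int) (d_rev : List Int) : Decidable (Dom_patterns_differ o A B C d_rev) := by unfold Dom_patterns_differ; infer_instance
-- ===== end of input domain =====

-- B replaces A's quadratic binary-insertion second sort and both rank arrays by a single
-- adjacent-pair scan of the value-sorted index list (objective: faster, O(n log n) vs O(n^2)).

-- ===== PORT A =====
-- shared by both ports: both Pythons build `terms` with literally the same loop
-- (the loop bodies are named helper functions; PySem.Int.floordiv is Python's //)
def pvInnerStep (a b : Int) (s : List (Int × Int × Int × Int) × Int × Int) (_ : Int) :
    List (Int × Int × Int × Int) × Int × Int :=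
  (s.1 ++ [(s.2.1, a, b, s.2.2)], PySem.Int.floordiv s.2.1 2, s.2.2 * 2)

def pvOuterStep (st : List (Int × Int × Int × Int) × Int × Int × Int × Int) (d : Int) :
    List (Int × Int × Int × Int) × Int × Int × Int × Int :=
  let a := 3 * st.2.2.1
  let b := 3 * st.2.2.2.1 - st.2.2.2.2
  let inner := (PySem.List.pyRange 0 d 1).foldl (pvInnerStep a b)
    (st.1 ++ [(st.2.1, st.2.2.1, st.2.2.2.1, st.2.2.2.2)], 3 * st.2.1 + 1, st.2.2.2.2)
  (inner.1, inner.2.1, a, b, inner.2.2)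

def pvBuildTerms (o A B C : Int) (d_rev : List Int) : List (Int × Int × Int × Int) :=
  let d_list := (PySem.List.slice? d_rev none none (-1)).getD []   -- d_rev[::-1]
  let st := d_list.foldl pvOuterStep ([], o, A, B, C)
  st.1 ++ [(st.2.1, st.2.2.1, st.2.2.2.1, st.2.2.2.2)]

-- shared comparator: the cross-multiplication test both Pythons spell out on (a, b, c)
def pvLt (t1 t2 : Int × Int × Int × Int) : Bool :=
  decide (t1.2.1 * t2.2.2.2 < t2.2.1 * t1.2.2.2) ||
    (t1.2.1 * t2.2.2.2 == t2.2.1 * t1.2.2.2 &&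
      decide (t1.2.2.1 * t2.2.2.2 < t2.2.2.1 * t1.2.2.2))

-- A's while-loop binary search; lo, hi are Nat (in Python they stay in [0, len(ordered)],
-- where (lo+hi)//2 is exactly Nat division)
def pvBisect (terms : List (Int × Int × Int × Int)) (x : Int × Int × Int × Int)
    (ordered : List Int) (lo hi : Nat) : Nat :=
  if lo < hi then
    let mid := (lo + hi) / 2
    let j := ordered.getD mid 0
    if pvLt x (PySem.List.pyGetD terms j (0, 0, 0, 0)) then
      pvBisect terms x ordered lo mid
    else
      pvBisect terms x ordered (mid + 1) hi
  else lo
termination_by hi - lo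
decreasing_by all_goals omega

def patterns_differ (o : Int) (A : Int) (B : Int) (C : Int) (d_rev : List Int) : Bool :=
  let terms := pvBuildTerms o A B C d_rev
  let n := terms.length
  let idxs : List Int :=
    PySem.List.sorted (PySem.List.pyRange 0 (n : Int) 1)
      (fun i => (PySem.List.pyGetD terms i (0, 0, 0, 0)).1) false
  let rank1 := (PySem.List.enumerate idxs 1).foldl
    (fun rank (p : Int × Int) => PySem.List.pySetD rank p.2 p.1)
    (List.replicate n (0 : Int))
  let ordered := (PySem.List.pyRange 0 (n : Int) 1).foldl
    (fun ord idx =>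
      let lo := pvBisect terms (PySem.List.pyGetD terms idx (0, 0, 0, 0)) ord 0 ord.length
      PySem.List.insert ord (lo : Int) idx)
    ([] : List Int)
  let rank2 := (PySem.List.enumerate ordered 1).foldl
    (fun rank (p : Int × Int) => PySem.List.pySetD rank p.2 p.1)
    (List.replicate n (0 : Int))
  rank1 != rank2

-- ===== PORT B =====
def patterns_differ_alt (o : Int) (A : Int) (B : Int) (C : Int) (d_rev : List Int) : Bool :=
  let terms := pvBuildTerms o A B C d_rev
  let n := terms.length
  let order1 : List Int :=
    PySem.List.sorted (PySem.List.pyRange 0 (n : Int) 1)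
      (fun i => (PySem.List.pyGetD terms i (0, 0, 0, 0)).1) false
  (order1.zip (PySem.List.slice order1 (some 1) none)).any
    (fun p =>
      let t1 := PySem.List.pyGetD terms p.1 (0, 0, 0, 0)
      let t2 := PySem.List.pyGetD terms p.2 (0, 0, 0, 0)
      !(pvLt t1 t2 || (!(pvLt t2 t1) && decide (p.1 < p.2))))

-- ===== PRECONDITION & SPEC =====
def Spec_patterns_differ (o : Int) (A : Int) (B : Int) (C : Int) (d_rev : List Int) (out : Bool) : Prop := out = patterns_differ_alt o A B C d_rev
instance (o : Int) (A : Int) (B : Int) (C : Int) (d_rev : List Int) (out : Bool) : Decidable (Spec_patterns_differ o A B C d_rev out) := by unfold Spec_patterns_differ; infer_instance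

-- ===== CLAIM (what is proved, stated in full; the proofs are below) =====
def Claim_equal_patterns_differ : Prop := ∀ (o : Int) (A : Int) (B : Int) (C : Int) (d_rev : List Int), Dom_patterns_differ o A B C d_rev → Spec_patterns_differ o A B C d_rev (patterns_differ o A B C d_rev)

-- ===== LEMMAS AND PROOFS =====

-- Rational key of a term: the comparator is lexicographic on (a/c, b/c) because every c
-- in `terms` is C·2^m (c only ever doubles), so all c share C's strict sign.
def pvQ (C : Int) (t : Int × Int × Int × Int) : ℚ × ℚ :=
  if C = 0 then (0, 0) else ((t.2.1 : ℚ) / (t.2.2.2 : ℚ), (t.2.2.1 : ℚ) / (t.2.2.2 : ℚ))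

def pvLex (p q : ℚ × ℚ) : Prop := p.1 < q.1 ∨ (p.1 = q.1 ∧ p.2 < q.2)

def pvCP (C : Int) (t : Int × Int × Int × Int) : Prop := ∃ m : Nat, t.2.2.2 = C * 2 ^ m

-- the total strict order that A's stable binary-insertion realizes and B's scan checks
def pvLT (terms : List (Int × Int × Int × Int)) (C : Int) (i j : Int) : Prop :=
  pvLex (pvQ C (PySem.List.pyGetD terms i (0,0,0,0))) (pvQ C (PySem.List.pyGetD terms j (0,0,0,0))) ∨
    (pvQ C (PySem.List.pyGetD terms i (0,0,0,0)) = pvQ C (PySem.List.pyGetD terms j (0,0,0,0)) ∧ i < j)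

lemma pvLex_trans {p q r : ℚ × ℚ} (h1 : pvLex p q) (h2 : pvLex q r) : pvLex p r := by
  rcases h1 with h1 | ⟨e1, h1⟩ <;> rcases h2 with h2 | ⟨e2, h2⟩
  · exact Or.inl (h1.trans h2)
  · exact Or.inl (e2 ▸ h1)
  · exact Or.inl (e1 ▸ h2)
  · exact Or.inr ⟨e1.trans e2, h1.trans h2⟩

lemma pvLex_irrefl (p : ℚ × ℚ) : ¬ pvLex p p := by simp [pvLex]

lemma pvLex_total (p q : ℚ × ℚ) : pvLex p q ∨ p = q ∨ pvLex q p := by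
  rcases lt_trichotomy p.1 q.1 with h | h | h
  · exact Or.inl (Or.inl h)
  · rcases lt_trichotomy p.2 q.2 with h2 | h2 | h2
    · exact Or.inl (Or.inr ⟨h, h2⟩)
    · exact Or.inr (Or.inl (Prod.ext h h2))
    · exact Or.inr (Or.inr (Or.inr ⟨h.symm, h2⟩))
  · exact Or.inr (Or.inr (Or.inl h))

lemma pvLT_trans (terms : List (Int × Int × Int × Int)) (C : Int) {i j k : Int}
    (h1 : pvLT terms C i j) (h2 : pvLT terms C j k) : pvLT terms C i k := by
  rcases h1 with h1 | ⟨e1, h1⟩ <;> rcases h2 with h2 | ⟨e2, h2⟩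
  · exact Or.inl (pvLex_trans h1 h2)
  · exact Or.inl (e2 ▸ h1)
  · exact Or.inl (e1 ▸ h2)
  · exact Or.inr ⟨e1.trans e2, h1.trans h2⟩

lemma pvLT_irrefl (terms : List (Int × Int × Int × Int)) (C : Int) (i : Int) :
    ¬ pvLT terms C i i := by
  intro h; rcases h with h | ⟨_, h⟩
  · exact pvLex_irrefl _ h
  · omega

-- generic cross-multiplication ↔ quotient comparison over ℚ
lemma pv_div_lt (a1 c1 a2 c2 : ℚ) (hc1 : c1 ≠ 0) (hc2 : c2 ≠ 0) (hpos : 0 < c1*c2) :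
    a1*c2 < a2*c1 ↔ a1/c1 < a2/c2 := by
  have e1 : a1/c1*(c1*c2) = a1*c2 := by field_simp
  have e2 : a2/c2*(c1*c2) = a2*c1 := by field_simp
  rw [← e1, ← e2]; exact Rat.mul_lt_mul_right hpos

lemma pv_div_eq (a1 c1 a2 c2 : ℚ) (hc1 : c1 ≠ 0) (hc2 : c2 ≠ 0) (hpos : 0 < c1*c2) :
    a1*c2 = a2*c1 ↔ a1/c1 = a2/c2 := by
  have e1 : a1/c1*(c1*c2) = a1*c2 := by field_simp
  have e2 : a2/c2*(c1*c2) = a2*c1 := by field_simp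
  rw [← e1, ← e2]; exact mul_left_inj' (ne_of_gt hpos)

-- bridge: under the same-sign property the cross-multiplication test IS the lex order on pvQ
lemma pvLt_iff (C : Int) (t1 t2 : Int × Int × Int × Int)
    (h1 : pvCP C t1) (h2 : pvCP C t2) :
    pvLt t1 t2 = true ↔ pvLex (pvQ C t1) (pvQ C t2) := by
  obtain ⟨m1, hm1⟩ := h1
  obtain ⟨m2, hm2⟩ := h2
  by_cases hC : C = 0
  · subst hC
    simp only [zero_mul] at hm1 hm2
    simp [pvLt, pvLex, pvQ, hm1, hm2]
  · have hCq : ((C : ℚ)) ≠ 0 := by exact_mod_cast hC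
    have hc1 : ((t1.2.2.2 : ℚ)) ≠ 0 := by
      rw [hm1]; push_cast
      exact mul_ne_zero hCq (by positivity)
    have hc2 : ((t2.2.2.2 : ℚ)) ≠ 0 := by
      rw [hm2]; push_cast
      exact mul_ne_zero hCq (by positivity)
    have hpos : (0 : ℚ) < (t1.2.2.2 : ℚ) * (t2.2.2.2 : ℚ) := by
      rw [hm1, hm2]; push_cast
      have hsq : (0:ℚ) < (C:ℚ)^2 := by
        rcases lt_or_gt_of_ne hCq with h | h
        · nlinarith
        · nlinarith
      have h2 : ((C:ℚ) * 2 ^ m1) * ((C:ℚ) * 2 ^ m2) = (C:ℚ)^2 * (2^m1 * 2^m2) := by ring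
      rw [h2]
      have hp : (0:ℚ) < (2:ℚ)^m1 * 2^m2 := by positivity
      exact mul_pos hsq hp
    have ha : t1.2.1 * t2.2.2.2 < t2.2.1 * t1.2.2.2 ↔
        (t1.2.1 : ℚ) / (t1.2.2.2 : ℚ) < (t2.2.1 : ℚ) / (t2.2.2.2 : ℚ) := by
      rw [← pv_div_lt _ _ _ _ hc1 hc2 hpos]; exact_mod_cast Iff.rfl
    have he : t1.2.1 * t2.2.2.2 = t2.2.1 * t1.2.2.2 ↔
        (t1.2.1 : ℚ) / (t1.2.2.2 : ℚ) = (t2.2.1 : ℚ) / (t2.2.2.2 : ℚ) := by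
      rw [← pv_div_eq _ _ _ _ hc1 hc2 hpos]; exact_mod_cast Iff.rfl
    have hb : t1.2.2.1 * t2.2.2.2 < t2.2.2.1 * t1.2.2.2 ↔
        (t1.2.2.1 : ℚ) / (t1.2.2.2 : ℚ) < (t2.2.2.1 : ℚ) / (t2.2.2.2 : ℚ) := by
      rw [← pv_div_lt _ _ _ _ hc1 hc2 hpos]; exact_mod_cast Iff.rfl
    simp only [pvLt, pvLex, pvQ, if_neg hC, Bool.or_eq_true, Bool.and_eq_true,
      decide_eq_true_eq, beq_iff_eq, ha, he, hb]

-- every term built has c = C * 2^m (c starts at C and only ever doubles)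
lemma pvInner_cp (C a b : Int) (l : List Int) :
    ∀ (s : List (Int × Int × Int × Int) × Int × Int),
      (∃ m : Nat, s.2.2 = C * 2 ^ m) → (∀ t ∈ s.1, pvCP C t) →
      (∃ m : Nat, (l.foldl (pvInnerStep a b) s).2.2 = C * 2 ^ m) ∧
      (∀ t ∈ (l.foldl (pvInnerStep a b) s).1, pvCP C t) := by
  induction l with
  | nil => intro s hs ht; exact ⟨hs, ht⟩
  | cons x xs ih =>
    intro s hs ht
    obtain ⟨m, hm⟩ := hs
    refine ih _ ⟨m + 1, by simp [pvInnerStep, hm]; ring⟩ ?_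
    intro t htm
    rcases List.mem_append.mp htm with h | h
    · exact ht t h
    · simp at h; subst h; exact ⟨m, hm⟩

lemma pvOuter_cp (C : Int) (l : List Int) :
    ∀ (st : List (Int × Int × Int × Int) × Int × Int × Int × Int),
      (∃ m : Nat, st.2.2.2.2 = C * 2 ^ m) → (∀ t ∈ st.1, pvCP C t) →
      (∃ m : Nat, (l.foldl pvOuterStep st).2.2.2.2 = C * 2 ^ m) ∧
      (∀ t ∈ (l.foldl pvOuterStep st).1, pvCP C t) := by
  induction l with
  | nil => intro st hs ht; exact ⟨hs, ht⟩
  | cons x xs ih =>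
    intro st hs ht
    obtain ⟨m, hm⟩ := hs
    have hterms : ∀ t ∈ st.1 ++ [(st.2.1, st.2.2.1, st.2.2.2.1, st.2.2.2.2)], pvCP C t := by
      intro t htm
      rcases List.mem_append.mp htm with h | h
      · exact ht t h
      · simp at h; subst h; exact ⟨m, hm⟩
    have hin := pvInner_cp C (3 * st.2.2.1) (3 * st.2.2.2.1 - st.2.2.2.2)
      (PySem.List.pyRange 0 x 1)
      (st.1 ++ [(st.2.1, st.2.2.1, st.2.2.2.1, st.2.2.2.2)], 3 * st.2.1 + 1, st.2.2.2.2)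
      ⟨m, hm⟩ hterms
    simp only [List.foldl_cons]
    exact ih _ hin.1 hin.2

lemma pvBuildTerms_cp (o A B C : Int) (d_rev : List Int) :
    ∀ t ∈ pvBuildTerms o A B C d_rev, pvCP C t := by
  intro t ht
  unfold pvBuildTerms at ht
  have h := pvOuter_cp C ((PySem.List.slice? d_rev none none (-1)).getD [])
    ([], o, A, B, C) ⟨0, by simp⟩ (by simp)
  rcases List.mem_append.mp ht with hh | hh
  · exact h.2 t hh
  · simp at hh; subst hh; exact h.1

lemma pvLex_le_trans {p q r : ℚ × ℚ} (h1 : pvLex p q) (h2 : pvLex q r ∨ q = r) : pvLex p r := by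
  rcases h2 with h2 | rfl
  · exact pvLex_trans h1 h2
  · exact h1

-- bisect specification on a pvLT-sorted list
lemma pvBisect_spec (terms : List (Int × Int × Int × Int)) (C : Int)
    (x : Int × Int × Int × Int)
    (hterms : ∀ t ∈ terms, pvCP C t)
    (hx : pvCP C x)
    (ord : List Int)
    (hmem : ∀ y ∈ ord, 0 ≤ y ∧ y < (terms.length : Int))
    (hsort : ord.Pairwise (pvLT terms C)) :
    ∀ (fuel lo hi : Nat), hi - lo ≤ fuel → lo ≤ hi → hi ≤ ord.length →
    (∀ k (hk : k < ord.length), k < lo → ¬ pvLex (pvQ C x) (pvQ C (PySem.List.pyGetD terms ord[k] (0,0,0,0)))) →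
    (∀ k (hk : k < ord.length), hi ≤ k → pvLex (pvQ C x) (pvQ C (PySem.List.pyGetD terms ord[k] (0,0,0,0)))) →
    (pvBisect terms x ord lo hi ≤ ord.length ∧
      (∀ k (hk : k < ord.length), k < pvBisect terms x ord lo hi → ¬ pvLex (pvQ C x) (pvQ C (PySem.List.pyGetD terms ord[k] (0,0,0,0)))) ∧
      (∀ k (hk : k < ord.length), pvBisect terms x ord lo hi ≤ k → pvLex (pvQ C x) (pvQ C (PySem.List.pyGetD terms ord[k] (0,0,0,0))))) := by
  have hpair := List.pairwise_iff_getElem.mp hsort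
  intro fuel
  induction fuel with
  | zero =>
    intro lo hi hfuel hlohi hhi Hlo Hhi
    have heq : lo = hi := by omega
    rw [pvBisect, if_neg (by omega)]
    subst heq
    exact ⟨hhi, fun k hk hklo => Hlo k hk hklo, fun k hk hge => Hhi k hk hge⟩
  | succ fuel ih =>
    intro lo hi hfuel hlohi hhi Hlo Hhi
    by_cases h : lo < hi
    · rw [pvBisect, if_pos h]
      have hmid : lo ≤ (lo + hi) / 2 ∧ (lo + hi) / 2 < hi := by omega
      set mid := (lo + hi) / 2 with hmiddef
      have hmidlen : mid < ord.length := by omega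
      have hjd : ord.getD mid 0 = ord[mid] := List.getD_eq_getElem ord 0 hmidlen
      have hjcp : pvCP C (PySem.List.pyGetD terms ord[mid] (0,0,0,0)) := by
        apply hterms
        apply PySem.List.pyGetD_mem
        have := hmem _ (List.getElem_mem hmidlen)
        constructor <;> omega
      have hmono : ∀ (p q : Nat) (hp : p < ord.length) (hq : q < ord.length), p < q →
          pvLex (pvQ C (PySem.List.pyGetD terms ord[p] (0,0,0,0))) (pvQ C (PySem.List.pyGetD terms ord[q] (0,0,0,0))) ∨
          pvQ C (PySem.List.pyGetD terms ord[p] (0,0,0,0)) = pvQ C (PySem.List.pyGetD terms ord[q] (0,0,0,0)) := by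
        intro p q hp hq hpq
        rcases hpair p q hp hq hpq with h | ⟨e, _⟩
        · exact Or.inl h
        · exact Or.inr e
      simp only [hjd]
      by_cases hcmp : pvLt x (PySem.List.pyGetD terms ord[mid] (0,0,0,0)) = true
      · rw [if_pos hcmp]
        have hlex : pvLex (pvQ C x) (pvQ C (PySem.List.pyGetD terms ord[mid] (0,0,0,0))) :=
          (pvLt_iff C _ _ hx hjcp).mp hcmp
        refine ih lo mid (by omega) (by omega) (by omega) Hlo ?_
        intro k hk hgem
        rcases Nat.eq_or_lt_of_le hgem with heqk | hltk
        · subst heqk; exact hlex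
        · exact pvLex_le_trans hlex (hmono mid k hmidlen hk hltk)
      · rw [if_neg hcmp]
        have hnlex : ¬ pvLex (pvQ C x) (pvQ C (PySem.List.pyGetD terms ord[mid] (0,0,0,0))) :=
          fun hl => hcmp ((pvLt_iff C _ _ hx hjcp).mpr hl)
        refine ih (mid + 1) hi (by omega) (by omega) hhi ?_ Hhi
        intro k hk hklt
        rcases Nat.lt_succ_iff_lt_or_eq.mp hklt with hlt | heqk
        · intro hl
          exact hnlex (pvLex_le_trans hl (hmono k mid hk hmidlen hlt))
        · subst heqk; exact hnlex
    · rw [pvBisect, if_neg h]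
      have heq : lo = hi := by omega
      subst heq
      exact ⟨hhi, fun k hk hklo => Hlo k hk hklo, fun k hk hge => Hhi k hk hge⟩

-- the insertion fold of A builds the pvLT-sorted permutation of range
lemma pvOrdered_spec (terms : List (Int × Int × Int × Int)) (C : Int)
    (hterms : ∀ t ∈ terms, pvCP C t) (n : Nat) (hn : n ≤ terms.length) :
    ((PySem.List.pyRange 0 (n : Int) 1).foldl
      (fun ord idx =>
        let lo := pvBisect terms (PySem.List.pyGetD terms idx (0, 0, 0, 0)) ord 0 ord.length
        PySem.List.insert ord (lo : Int) idx) ([] : List Int)).Perm (PySem.List.pyRange 0 (n : Int) 1) ∧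
    ((PySem.List.pyRange 0 (n : Int) 1).foldl
      (fun ord idx =>
        let lo := pvBisect terms (PySem.List.pyGetD terms idx (0, 0, 0, 0)) ord 0 ord.length
        PySem.List.insert ord (lo : Int) idx) ([] : List Int)).Pairwise (pvLT terms C) := by
  induction n with
  | zero =>
    rw [show ((0 : Nat) : Int) = 0 from rfl]
    rw [PySem.List.pyRange_one_eq_nil (by omega)]
    simp
  | succ n ihn =>
    have hn' : n ≤ terms.length := by omega
    obtain ⟨ihperm, ihsort⟩ := ihn hn'
    have hsplit : PySem.List.pyRange 0 ((n + 1 : Nat) : Int) 1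
        = PySem.List.pyRange 0 (n : Int) 1 ++ [(n : Int)] := by
      push_cast
      exact PySem.List.pyRange_one_succ_right (by positivity)
    rw [hsplit, List.foldl_append]
    set ord := (PySem.List.pyRange 0 (n : Int) 1).foldl
      (fun ord idx =>
        let lo := pvBisect terms (PySem.List.pyGetD terms idx (0, 0, 0, 0)) ord 0 ord.length
        PySem.List.insert ord (lo : Int) idx) ([] : List Int) with hord
    simp only [List.foldl_cons, List.foldl_nil]
    have hmemord : ∀ y ∈ ord, 0 ≤ y ∧ y < (terms.length : Int) := by
      intro y hy
      have hmem := PySem.List.mem_pyRange_one.mp (ihperm.mem_iff.mp hy)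
      have hle : (n : Int) ≤ (terms.length : Int) := by exact_mod_cast hn'
      omega
    have hxmem : PySem.List.pyGetD terms ((n : Nat) : Int) (0,0,0,0) ∈ terms := by
      apply PySem.List.pyGetD_mem
      have h1 : n < terms.length := by omega
      have h2 : ((n : Nat) : Int) < (terms.length : Int) := by exact_mod_cast h1
      constructor
      · have : (0 : Int) ≤ ((n : Nat) : Int) := by positivity
        omega
      · exact h2
    have hxcp : pvCP C (PySem.List.pyGetD terms ((n : Nat) : Int) (0,0,0,0)) := hterms _ hxmem
    have hbs := pvBisect_spec terms C _ hterms hxcp ord hmemord ihsort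
      ord.length 0 ord.length (by omega) (by omega) (by omega)
      (by intro k hk hklo; omega)
      (by intro k hk hge; omega)
    set r := pvBisect terms (PySem.List.pyGetD terms ((n : Nat) : Int) (0,0,0,0)) ord 0 ord.length with hr
    obtain ⟨hrle, Hpre, Hsuf⟩ := hbs
    have hins : PySem.List.insert ord ((r : Nat) : Int) ((n : Nat) : Int)
        = ord.take r ++ ((n : Nat) : Int) :: ord.drop r :=
      PySem.List.insert_natCast ord r _ hrle
    rw [hins]
    constructor
    · have p1 : (ord.take r ++ ((n : Nat) : Int) :: ord.drop r).Perm (((n : Nat) : Int) :: ord) := by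
        have h := List.perm_middle (a := ((n : Nat) : Int)) (l₁ := ord.take r) (l₂ := ord.drop r)
        rwa [List.take_append_drop] at h
      exact p1.trans ((ihperm.cons _).trans (List.perm_append_singleton _ _).symm)
    · rw [List.pairwise_append]
      refine ⟨ihsort.sublist (List.take_sublist _ _), ?_, ?_⟩
      · rw [List.pairwise_cons]
        refine ⟨?_, ihsort.sublist (List.drop_sublist _ _)⟩
        intro y hy
        obtain ⟨k, hk, hky⟩ := List.mem_iff_getElem.mp hy
        have hrk : r + k < ord.length := by
          rw [List.length_drop] at hk
          omega
        have hgd : (ord.drop r)[k] = ord[r + k] := List.getElem_drop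
        rw [hgd] at hky
        subst hky
        exact Or.inl (Hsuf (r + k) hrk (by omega))
      · intro a ha b hb
        rcases List.mem_cons.mp hb with rfl | hbd
        · obtain ⟨k, hk, hka⟩ := List.mem_iff_getElem.mp ha
          have hklen : k < ord.length := by
            rw [List.length_take] at hk
            omega
          have hkr : k < r := by
            rw [List.length_take] at hk
            omega
          have hgt : (ord.take r)[k] = ord[k] := List.getElem_take
          rw [hgt] at hka
          subst hka
          have hnp := Hpre k hklen hkr
          have hlt : ord[k] < ((n : Nat) : Int) :=
            (PySem.List.mem_pyRange_one.mp (ihperm.mem_iff.mp (List.getElem_mem hklen))).2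
          rcases pvLex_total (pvQ C (PySem.List.pyGetD terms ord[k] (0,0,0,0)))
              (pvQ C (PySem.List.pyGetD terms ((n : Nat) : Int) (0,0,0,0))) with hl | he | hgt2
          · exact Or.inl hl
          · exact Or.inr ⟨he, hlt⟩
          · exact absurd hgt2 hnp
        · have hsp : (ord.take r ++ ord.drop r).Pairwise (pvLT terms C) := by
            rw [List.take_append_drop]; exact ihsort
          exact (List.pairwise_append.mp hsp).2.2 a ha b hbd

-- scatter (rank) characterization and injectivity
lemma pvScatter_untouched (t : List Int) (s : Int) (base : List Int) (i : Nat)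
    (h : ∀ x ∈ t, 0 ≤ x ∧ x.toNat ≠ i) :
    ((PySem.List.enumerate t s).foldl
      (fun rank (p : Int × Int) => PySem.List.pySetD rank p.2 p.1) base).getD i 0
      = base.getD i 0 := by
  induction t generalizing s base with
  | nil => simp [PySem.List.enumerate]
  | cons x xs ih =>
    rw [PySem.List.enumerate_cons, List.foldl_cons]
    dsimp only
    rw [ih (s + 1) _ (fun y hy => h y (List.mem_cons_of_mem _ hy))]
    have hx := h x (List.mem_cons_self)
    rw [PySem.List.pySetD_of_nonneg base _ hx.1]
    simp [List.getD_eq_getElem?_getD, List.getElem?_set_ne hx.2]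

lemma pvScatter_get (l : List Int) (s : Int) (base : List Int)
    (hl : l.Nodup) (hmem : ∀ x ∈ l, 0 ≤ x) :
    ∀ k (hk : k < l.length),
      ((PySem.List.enumerate l s).foldl
        (fun rank (p : Int × Int) => PySem.List.pySetD rank p.2 p.1) base).getD (l[k]).toNat 0
        = if (l[k]).toNat < base.length then s + k else base.getD (l[k]).toNat 0 := by
  induction l generalizing s base with
  | nil => intro k hk; simp at hk
  | cons x xs ih =>
    intro k hk
    rw [PySem.List.enumerate_cons, List.foldl_cons]
    dsimp only
    rcases Nat.eq_zero_or_pos k with rfl | hkpos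
    · simp only [List.getElem_cons_zero]
      have hx0 : 0 ≤ x := hmem x List.mem_cons_self
      have hxnot : ∀ y ∈ xs, 0 ≤ y ∧ y.toNat ≠ x.toNat := by
        intro y hy
        have hy0 : 0 ≤ y := hmem y (List.mem_cons_of_mem _ hy)
        refine ⟨hy0, fun hc => ?_⟩
        have : y = x := by omega
        exact (List.nodup_cons.mp hl).1 (this ▸ hy)
      rw [pvScatter_untouched _ _ _ _ hxnot]
      rw [PySem.List.pySetD_of_nonneg base _ hx0]
      by_cases hlen : x.toNat < base.length
      · rw [if_pos hlen]
        simp [List.getD_eq_getElem?_getD, hlen]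
      · rw [if_neg hlen]
        rw [List.set_eq_of_length_le (by omega)]
    · obtain ⟨k', rfl⟩ : ∃ k', k = k' + 1 := ⟨k - 1, by omega⟩
      simp only [List.getElem_cons_succ]
      have hkx : k' < xs.length := by simpa using hk
      rw [ih (s + 1) _ (List.nodup_cons.mp hl).2 (fun y hy => hmem y (List.mem_cons_of_mem _ hy)) k' hkx]
      have hx0 : 0 ≤ x := hmem x List.mem_cons_self
      rw [PySem.List.pySetD_of_nonneg base _ hx0]
      have hne : (xs[k']).toNat ≠ x.toNat := by
        have hy0 : 0 ≤ xs[k'] := hmem _ (List.mem_cons_of_mem _ (List.getElem_mem hkx))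
        intro hc
        have : xs[k'] = x := by omega
        exact (List.nodup_cons.mp hl).1 (this ▸ List.getElem_mem hkx)
      rw [List.length_set]
      by_cases hlen : (xs[k']).toNat < base.length
      · rw [if_pos hlen, if_pos hlen]
        push_cast
        ring
      · rw [if_neg hlen, if_neg hlen]
        simp [List.getD_eq_getElem?_getD, List.getElem?_set_ne (Ne.symm hne)]

lemma pvScatter_inj (n : Nat) (l1 l2 : List Int)
    (h1 : l1.Perm (PySem.List.pyRange 0 (n : Int) 1))
    (h2 : l2.Perm (PySem.List.pyRange 0 (n : Int) 1))
    (he : (PySem.List.enumerate l1 1).foldl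
        (fun rank (p : Int × Int) => PySem.List.pySetD rank p.2 p.1) (List.replicate n (0:Int))
      = (PySem.List.enumerate l2 1).foldl
        (fun rank (p : Int × Int) => PySem.List.pySetD rank p.2 p.1) (List.replicate n (0:Int))) :
    l1 = l2 := by
  have hnd : (PySem.List.pyRange 0 (n : Int) 1).Nodup := PySem.List.nodup_pyRange_one 0 (n : Int)
  have hnd1 : l1.Nodup := h1.nodup_iff.mpr hnd
  have hnd2 : l2.Nodup := h2.nodup_iff.mpr hnd
  have hm1 : ∀ x ∈ l1, 0 ≤ x ∧ x < (n : Int) := by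
    intro x hx
    have := PySem.List.mem_pyRange_one.mp (h1.mem_iff.mp hx)
    omega
  have hm2 : ∀ x ∈ l2, 0 ≤ x ∧ x < (n : Int) := by
    intro x hx
    have := PySem.List.mem_pyRange_one.mp (h2.mem_iff.mp hx)
    omega
  have hlen1 : l1.length = n := by
    rw [h1.length_eq, PySem.List.length_pyRange_one]; omega
  have hlen2 : l2.length = n := by
    rw [h2.length_eq, PySem.List.length_pyRange_one]; omega
  apply List.ext_getElem (by omega)
  intro k hk1 hk2
  by_contra hne
  -- x := l1[k] occurs in l2 at some position k' ≠ k
  have hx2 : l1[k] ∈ l2 := h2.mem_iff.mpr (h1.mem_iff.mp (List.getElem_mem hk1))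
  obtain ⟨k', hk', hkx⟩ := List.mem_iff_getElem.mp hx2
  have hv1 := pvScatter_get l1 1 (List.replicate n (0:Int)) hnd1 (fun x hx => (hm1 x hx).1) k hk1
  have hv2 := pvScatter_get l2 1 (List.replicate n (0:Int)) hnd2 (fun x hx => (hm2 x hx).1) k' hk'
  rw [hkx] at hv2
  have hrlen : (l1[k]).toNat < (List.replicate n (0:Int)).length := by
    have := hm1 _ (List.getElem_mem hk1)
    rw [List.length_replicate]
    omega
  rw [if_pos hrlen] at hv1 hv2
  rw [he, hv2] at hv1
  have hkk : k' = k := by omega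
  subst hkk
  exact hne hkx.symm

-- adjacent pairs + transitivity give full pairwise order
lemma pv_pairwise_of_adjacent {α : Type} (R : α → α → Prop)
    (htrans : ∀ a b c, R a b → R b c → R a c) (l : List α)
    (h : ∀ k (hk : k + 1 < l.length), R l[k] l[k + 1]) : l.Pairwise R := by
  rw [List.pairwise_iff_getElem]
  intro i j hi hj hij
  have main : ∀ d i j (hi : i < l.length) (hj : j < l.length), j = i + d + 1 → R l[i] l[j] := by
    intro d
    induction d with
    | zero =>
      intro i j hi hj he
      subst he
      exact h i hj
    | succ d ihd =>
      intro i j hi hj he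
      have hj1 : i + d + 1 < l.length := by omega
      have h1 := ihd i (i + d + 1) hi hj1 rfl
      have h2 := h (i + d + 1) (by omega)
      subst he
      exact htrans _ _ _ h1 h2
  exact main (j - i - 1) i j hi hj (by omega)

-- B's per-pair test decides exactly pvLT
lemma pvOk_iff (terms : List (Int × Int × Int × Int)) (C : Int) (i j : Int)
    (hi : pvCP C (PySem.List.pyGetD terms i (0,0,0,0)))
    (hj : pvCP C (PySem.List.pyGetD terms j (0,0,0,0))) :
    (pvLt (PySem.List.pyGetD terms i (0,0,0,0)) (PySem.List.pyGetD terms j (0,0,0,0)) ||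
      (!(pvLt (PySem.List.pyGetD terms j (0,0,0,0)) (PySem.List.pyGetD terms i (0,0,0,0))) &&
        decide (i < j))) = true ↔ pvLT terms C i j := by
  rw [Bool.or_eq_true, Bool.and_eq_true, Bool.not_eq_true', decide_eq_true_eq]
  constructor
  · rintro (h | ⟨hf, hij⟩)
    · exact Or.inl ((pvLt_iff C _ _ hi hj).mp h)
    · have hnl : ¬ pvLex (pvQ C (PySem.List.pyGetD terms j (0,0,0,0))) (pvQ C (PySem.List.pyGetD terms i (0,0,0,0))) := by
        intro hl
        rw [(pvLt_iff C _ _ hj hi).mpr hl] at hf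
        simp at hf
      rcases pvLex_total (pvQ C (PySem.List.pyGetD terms i (0,0,0,0)))
          (pvQ C (PySem.List.pyGetD terms j (0,0,0,0))) with hl | he | hg
      · exact Or.inl hl
      · exact Or.inr ⟨he, hij⟩
      · exact absurd hg hnl
  · rintro (h | ⟨he, hij⟩)
    · exact Or.inl ((pvLt_iff C _ _ hi hj).mpr h)
    · refine Or.inr ⟨?_, hij⟩
      rw [← Bool.not_eq_true]
      intro hl
      have := (pvLt_iff C _ _ hj hi).mp hl
      rw [he] at this
      exact pvLex_irrefl _ this

-- the heart of the claim, stated over an abstract terms list with the same-sign property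
lemma pv_core (terms : List (Int × Int × Int × Int)) (C : Int)
    (hterms : ∀ t ∈ terms, pvCP C t) :
    ((PySem.List.enumerate (PySem.List.sorted (PySem.List.pyRange 0 (terms.length : Int) 1)
        (fun i => (PySem.List.pyGetD terms i (0, 0, 0, 0)).1) false) 1).foldl
      (fun rank (p : Int × Int) => PySem.List.pySetD rank p.2 p.1)
      (List.replicate terms.length (0 : Int)) !=
     (PySem.List.enumerate ((PySem.List.pyRange 0 (terms.length : Int) 1).foldl
        (fun ord idx =>
          let lo := pvBisect terms (PySem.List.pyGetD terms idx (0, 0, 0, 0)) ord 0 ord.length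
          PySem.List.insert ord (lo : Int) idx) ([] : List Int)) 1).foldl
      (fun rank (p : Int × Int) => PySem.List.pySetD rank p.2 p.1)
      (List.replicate terms.length (0 : Int)))
    =
    (((PySem.List.sorted (PySem.List.pyRange 0 (terms.length : Int) 1)
        (fun i => (PySem.List.pyGetD terms i (0, 0, 0, 0)).1) false).zip
      (PySem.List.slice (PySem.List.sorted (PySem.List.pyRange 0 (terms.length : Int) 1)
        (fun i => (PySem.List.pyGetD terms i (0, 0, 0, 0)).1) false) (some 1) none)).any
      (fun p =>
        !(pvLt (PySem.List.pyGetD terms p.1 (0,0,0,0)) (PySem.List.pyGetD terms p.2 (0,0,0,0)) ||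
          (!(pvLt (PySem.List.pyGetD terms p.2 (0,0,0,0)) (PySem.List.pyGetD terms p.1 (0,0,0,0))) &&
            decide (p.1 < p.2))))) := by
  set n := terms.length with hn
  set σ := PySem.List.sorted (PySem.List.pyRange 0 (n : Int) 1)
    (fun i => (PySem.List.pyGetD terms i (0, 0, 0, 0)).1) false with hσ
  set ordered := (PySem.List.pyRange 0 (n : Int) 1).foldl
    (fun ord idx =>
      let lo := pvBisect terms (PySem.List.pyGetD terms idx (0, 0, 0, 0)) ord 0 ord.length
      PySem.List.insert ord (lo : Int) idx) ([] : List Int) with hordered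
  have hσperm : σ.Perm (PySem.List.pyRange 0 (n : Int) 1) := PySem.List.sorted_perm _ _ _
  have hOrd : ordered.Perm (PySem.List.pyRange 0 (n : Int) 1) ∧ ordered.Pairwise (pvLT terms C) :=
    pvOrdered_spec terms C hterms n (le_refl _)
  clear_value σ ordered
  have hmemσ : ∀ x ∈ σ, 0 ≤ x ∧ x < (n : Int) := by
    intro x hx
    have := PySem.List.mem_pyRange_one.mp (hσperm.mem_iff.mp hx)
    omega
  have hcp : ∀ x ∈ σ, pvCP C (PySem.List.pyGetD terms x (0,0,0,0)) := by
    intro x hx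
    apply hterms
    apply PySem.List.pyGetD_mem
    have h1 := hmemσ x hx
    have h2 : (terms.length : Int) = (n : Int) := by rw [hn]
    constructor <;> omega
  -- step 1: the rank arrays differ iff σ ≠ ordered
  have h1 : ((PySem.List.enumerate σ 1).foldl
        (fun rank (p : Int × Int) => PySem.List.pySetD rank p.2 p.1) (List.replicate n (0:Int))
      = (PySem.List.enumerate ordered 1).foldl
        (fun rank (p : Int × Int) => PySem.List.pySetD rank p.2 p.1) (List.replicate n (0:Int)))
      ↔ σ = ordered := by
    constructor
    · exact pvScatter_inj n σ ordered hσperm hOrd.1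
    · intro h; rw [h]
  -- step 2: σ = ordered iff σ is pairwise-sorted under pvLT
  have h2 : σ = ordered ↔ σ.Pairwise (pvLT terms C) := by
    constructor
    · intro h; rw [h]; exact hOrd.2
    · intro hp
      exact List.Perm.eq_of_pairwise
        (fun a b _ _ hab hba => absurd (pvLT_trans terms C hab hba) (pvLT_irrefl terms C a))
        hp hOrd.2 (hσperm.trans hOrd.1.symm)
  -- step 3: pairwise iff every adjacent pair is ordered
  have h3 : σ.Pairwise (pvLT terms C) ↔ ∀ k (hk : k + 1 < σ.length), pvLT terms C σ[k] σ[k + 1] := by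
    constructor
    · intro hp k hk
      exact List.pairwise_iff_getElem.mp hp k (k+1) (by omega) hk (by omega)
    · intro h
      exact pv_pairwise_of_adjacent (pvLT terms C) (fun a b c hab hbc => pvLT_trans terms C hab hbc) σ h
  -- step 4: B's any-scan finds exactly a violated adjacent pair
  have h4 : ((σ.zip (PySem.List.slice σ (some 1) none)).any
      (fun p =>
        !(pvLt (PySem.List.pyGetD terms p.1 (0,0,0,0)) (PySem.List.pyGetD terms p.2 (0,0,0,0)) ||
          (!(pvLt (PySem.List.pyGetD terms p.2 (0,0,0,0)) (PySem.List.pyGetD terms p.1 (0,0,0,0))) &&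
            decide (p.1 < p.2)))) = true)
      ↔ ∃ k, ∃ _hk : k + 1 < σ.length, ¬ pvLT terms C σ[k] σ[k + 1] := by
    rw [PySem.List.slice_from_one, List.any_eq_true]
    constructor
    · rintro ⟨p, hp, hbad⟩
      obtain ⟨k, hk, hpk⟩ := List.mem_iff_getElem.mp hp
      have hklen : k + 1 < σ.length := by
        rw [List.length_zip, List.length_tail] at hk
        omega
      have hz : (σ.zip σ.tail)[k] = (σ[k], σ.tail[k]'(by rw [List.length_tail]; omega)) :=
        List.getElem_zip
      have ht : σ.tail[k]'(by rw [List.length_tail]; omega) = σ[k + 1] := by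
        simp [List.getElem_tail]
      rw [hz, ht] at hpk
      subst hpk
      refine ⟨k, hklen, ?_⟩
      intro hLT
      rw [Bool.not_eq_true', ← Bool.not_eq_true] at hbad
      exact hbad ((pvOk_iff terms C σ[k] σ[k+1]
        (hcp _ (List.getElem_mem (by omega))) (hcp _ (List.getElem_mem hklen))).mpr hLT)
    · rintro ⟨k, hk, hbad⟩
      refine ⟨(σ[k], σ[k+1]), ?_, ?_⟩
      · rw [List.mem_iff_getElem]
        refine ⟨k, ?_, ?_⟩
        · rw [List.length_zip, List.length_tail]; omega
        · have hz : (σ.zip σ.tail)[k]'(by rw [List.length_zip, List.length_tail]; omega)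
              = (σ[k], σ.tail[k]'(by rw [List.length_tail]; omega)) := List.getElem_zip
          rw [hz]
          have ht : σ.tail[k]'(by rw [List.length_tail]; omega) = σ[k + 1] := by
            simp [List.getElem_tail]
          rw [ht]
      · rw [Bool.not_eq_true', ← Bool.not_eq_true]
        intro hok
        exact hbad ((pvOk_iff terms C σ[k] σ[k+1]
          (hcp _ (List.getElem_mem (by omega))) (hcp _ (List.getElem_mem hk))).mp hok)
  -- assemble
  rw [Bool.eq_iff_iff, bne_iff_ne, Ne, h1, h2, h3, h4]
  constructor
  · intro hne
    by_contra hall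
    refine hne (fun k hk => ?_)
    by_contra hbad
    exact hall ⟨k, hk, hbad⟩
  · rintro ⟨k, hk, hbad⟩ hall
    exact hbad (hall k hk)

lemma pv_main (o A B C : Int) (d_rev : List Int) :
    patterns_differ o A B C d_rev = patterns_differ_alt o A B C d_rev := by
  simp only [patterns_differ, patterns_differ_alt]
  exact pv_core (pvBuildTerms o A B C d_rev) C (pvBuildTerms_cp o A B C d_rev)

-- ===== VERDICT (by name: the statement is the Claim_ definition above) =====
theorem patterns_differ_spec : Claim_equal_patterns_differ := by
  intro o A B C d_rev _dom
  unfold Spec_patterns_differ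
  exact pv_main o A B C d_rev
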